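-- pv_equiv track=rewrite | github.com/Javiramos276/Algoritmos1Haskell-Python | Practica7.py | divide_a_todos
-- ===== SOURCE A (Python) =====
-- def divide_a_todos(s= list[int],e = int)-> bool:
--     if e != 0:
--         for numero in s:
--             if ((numero % e) != 0):
--                 return False
--         return True
--     else:
--         return False
-- ===== SOURCE B (Python) =====
-- import math
-- from functools import reduce
--
-- def divide_a_todos(s=list[int], e=int) -> bool:
--     if e == 0:
--         return False
--     g = reduce(math.gcd, s, 0)
--     return g % e == 0
-- ===== Notes on version B (the rewrite author's own statement) =====
-- stated objective: alternative
-- what changed: Replaces the element-by-element divisibility loop with a single gcd fold (reduce(math.gcd, s, 0)) and one divisibility test g % e == 0, using that e divides every element iff e divides their gcd.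
import Mathlib
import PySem

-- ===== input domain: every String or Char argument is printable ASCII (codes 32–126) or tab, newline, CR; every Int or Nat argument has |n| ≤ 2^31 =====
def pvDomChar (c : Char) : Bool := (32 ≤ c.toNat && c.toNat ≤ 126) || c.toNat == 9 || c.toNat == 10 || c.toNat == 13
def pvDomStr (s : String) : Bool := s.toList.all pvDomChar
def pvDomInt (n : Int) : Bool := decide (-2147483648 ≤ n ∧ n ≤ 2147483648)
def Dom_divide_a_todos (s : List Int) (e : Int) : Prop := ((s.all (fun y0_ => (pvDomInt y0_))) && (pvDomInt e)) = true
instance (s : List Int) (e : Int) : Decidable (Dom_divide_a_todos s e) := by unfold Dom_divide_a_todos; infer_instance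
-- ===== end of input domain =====

-- B replaces the element-by-element divisibility loop with one gcd fold and a single
-- divisibility test (e divides every element iff e divides their gcd); objective: alternative.

-- ===== PORT A =====
-- the 'for numero in s' loop with its early 'return False'
def divideLoopA (s : List Int) (e : Int) : Bool :=
  match s with
  | [] => true
  | numero :: rest => if PySem.Int.mod numero e ≠ 0 then false else divideLoopA rest e

def divide_a_todos (s : List Int) (e : Int) : Bool :=
  if e ≠ 0 then divideLoopA s e else false

-- ===== PORT B =====
def divide_a_todos_alt (s : List Int) (e : Int) : Bool :=
  if e = 0 then false
  else
    -- reduce(math.gcd, s, 0); math.gcd is nonnegative, Int.gcd returns a Nat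
    let g : Int := s.foldl (fun acc x => (Int.gcd acc x : Int)) 0
    PySem.Int.mod g e == 0

-- ===== PRECONDITION & SPEC =====
def Spec_divide_a_todos (s : List Int) (e : Int) (out : Bool) : Prop := out = divide_a_todos_alt s e
instance (s : List Int) (e : Int) (out : Bool) : Decidable (Spec_divide_a_todos s e out) := by unfold Spec_divide_a_todos; infer_instance

-- ===== CLAIM (what is proved, stated in full; the proofs are below) =====
def Claim_equal_divide_a_todos : Prop := ∀ (s : List Int) (e : Int), Dom_divide_a_todos s e → Spec_divide_a_todos s e (divide_a_todos s e)

-- ===== LEMMAS AND PROOFS =====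

-- e divides the gcd-fold iff e divides the seed and every element
theorem dvd_gcdfold_iff (s : List Int) (e a : Int) :
    (e ∣ s.foldl (fun acc x => (Int.gcd acc x : Int)) a) ↔ (e ∣ a ∧ ∀ x ∈ s, e ∣ x) := by
  induction s generalizing a with
  | nil => simp
  | cons h t ih =>
    simp only [List.foldl_cons, ih, List.mem_cons]
    constructor
    · rintro ⟨hg, hall⟩
      have h1 : e ∣ a := dvd_trans hg (Int.gcd_dvd_left a h)
      have h2 : e ∣ h := dvd_trans hg (Int.gcd_dvd_right a h)
      exact ⟨h1, fun x hx => hx.elim (fun hxe => hxe ▸ h2) (hall x)⟩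
    · rintro ⟨ha, hall⟩
      exact ⟨Int.dvd_coe_gcd ha (hall h (Or.inl rfl)), fun x hx => hall x (Or.inr hx)⟩

theorem loopA_eq (s : List Int) (e : Int) :
    divideLoopA s e = decide (∀ x ∈ s, e ∣ x) := by
  induction s with
  | nil => simp [divideLoopA]
  | cons h t ih =>
    simp only [divideLoopA, ih]
    by_cases hd : e ∣ h
    · have : PySem.Int.mod h e = 0 := (PySem.Int.mod_eq_zero_iff_dvd h e).mpr hd
      simp [this, hd]
    · have : PySem.Int.mod h e ≠ 0 := fun hc => hd ((PySem.Int.mod_eq_zero_iff_dvd h e).mp hc)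
      simp [this, hd]

-- ===== VERDICT (by name: the statement is the Claim_ definition above) =====
theorem divide_a_todos_spec : Claim_equal_divide_a_todos := by
  intro s e _
  unfold Spec_divide_a_todos divide_a_todos divide_a_todos_alt
  by_cases he : e = 0
  · simp [he]
  · simp only [he, ne_eq, not_false_iff, if_true, if_false]
    rw [loopA_eq s e]
    have hg := dvd_gcdfold_iff s e 0
    by_cases hall : ∀ x ∈ s, e ∣ x
    · have : e ∣ s.foldl (fun acc x => (Int.gcd acc x : Int)) 0 := hg.mpr ⟨dvd_zero e, hall⟩
      simp [(PySem.Int.mod_eq_zero_iff_dvd _ e).mpr this]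
      exact hall
    · have : ¬ e ∣ s.foldl (fun acc x => (Int.gcd acc x : Int)) 0 := fun hc => hall (hg.mp hc).2
      have hm : PySem.Int.mod (s.foldl (fun acc x => (Int.gcd acc x : Int)) 0) e ≠ 0 :=
        fun hc => this ((PySem.Int.mod_eq_zero_iff_dvd _ e).mp hc)
      simp [hall, hm]
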